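-- pv_equiv track=rewrite | github.com/Ju-yeop/Programmers | Bruteforce/Collection_Dictionary.py | solution
-- ===== SOURCE A (Python) =====
-- from itertools import product
--
-- def solution(word):
--     ls = ['A', 'E', 'I', 'O', 'U']
--     all_data = []
--     for i in range(5):
--         for per in product(ls, repeat=i):
--             all_data.append(''.join(per))
--     all_data.sort()
--     return all_data.index(word) + 1
-- ===== SOURCE B (Python) =====
-- def solution(word):
--     vowels = ['A', 'E', 'I', 'O', 'U']
--     weights = [156, 31, 6, 1]
--     idx = 1
--     for i, c in enumerate(word):
--         idx += vowels.index(c) * weights[i] + 1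
--     return idx
-- ===== Notes on version B (the rewrite author's own statement) =====
-- stated objective: faster
-- what changed: A builds all 781 vowel strings of length <= 4 with itertools.product, sorts them and scans for the word's index; B computes the index directly in closed form as 1 + sum over positions of rank(c)*weight[i] + 1 with mixed-radix weights [156, 31, 6, 1].
import Mathlib
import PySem

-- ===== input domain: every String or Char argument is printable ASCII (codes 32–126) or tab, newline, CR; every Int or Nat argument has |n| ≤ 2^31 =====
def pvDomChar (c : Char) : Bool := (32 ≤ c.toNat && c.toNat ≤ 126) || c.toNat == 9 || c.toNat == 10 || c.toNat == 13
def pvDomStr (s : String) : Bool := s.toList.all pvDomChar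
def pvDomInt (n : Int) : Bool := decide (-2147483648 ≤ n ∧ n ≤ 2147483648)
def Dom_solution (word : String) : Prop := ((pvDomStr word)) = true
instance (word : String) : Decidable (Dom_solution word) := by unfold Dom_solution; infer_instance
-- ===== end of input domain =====

-- B replaces A's generate-all-combinations-sort-and-scan search by a closed-form
-- mixed-radix index computation with weights [156, 31, 6, 1]; objective: faster.
-- Strings are handled on the `List Char` side (same code-point order as Python's str compare).

-- ===== PORT A =====
-- itertools.product(ls, repeat=i) over the vowel list, as lists of chars
def pvProd : Nat → List (List Char)
  | 0 => [[]]
  | n + 1 => (['A', 'E', 'I', 'O', 'U'] : List Char).flatMap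
      (fun c => (pvProd n).map (fun t => c :: t))

def solution (word : String) : Int :=
  let all_data : List (List Char) :=
    (List.range 5).foldl (fun acc i => acc ++ pvProd i) []
  match PySem.List.index? (PySem.List.sorted all_data (fun t => t) false) word.toList with
  | some k => (k : Int) + 1
  | none => 0   -- Python raises ValueError here; these inputs are excluded by Pre_solution

-- ===== PORT B =====
def solution_alt (word : String) : Int :=
  (PySem.List.enumerate word.toList).foldl
    (fun idx p =>
      idx + (((PySem.List.index? (['A', 'E', 'I', 'O', 'U'] : List Char) p.2).getD 0 : Int)
              * (PySem.List.pyGet? ([156, 31, 6, 1] : List Int) p.1).getD 0) + 1)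
    1

-- ===== PRECONDITION & SPEC =====
-- Pre_ excludes exactly the words on which A raises ValueError (word not among the
-- generated combinations): words longer than 4 or containing a non-vowel character.
def Pre_solution (word : String) : Prop :=
  word.toList.length ≤ 4 ∧ (word.toList.all (fun c => c ∈ (['A', 'E', 'I', 'O', 'U'] : List Char))) = true
instance (word : String) : Decidable (Pre_solution word) := by unfold Pre_solution; infer_instance

def pvWitness_solution : String := "AEIO"

def Spec_solution (word : String) (out : Int) : Prop := out = solution_alt word
instance (word : String) (out : Int) : Decidable (Spec_solution word out) := by unfold Spec_solution; infer_instance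

-- ===== CLAIM (what is proved, stated in full; the proofs are below) =====
def Claim_equal_solution : Prop := ∀ (word : String), Dom_solution word → Pre_solution word → Spec_solution word (solution word)

-- ===== LEMMAS AND PROOFS =====

-- the vowel list, abbreviated for the proofs
def pvV : List Char := ['A', 'E', 'I', 'O', 'U']

-- number of vowel strings of length ≤ n : 1, 6, 31, 156, 781
def pvG : Nat → Nat
  | 0 => 1
  | n + 1 => 5 * pvG n + 1

-- the sorted enumeration of all vowel strings of length ≤ n
def pvGen : Nat → List (List Char)
  | 0 => [[]]
  | n + 1 => [] :: pvV.flatMap (fun c => (pvGen n).map (fun t => c :: t))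

-- 0-based position of cs in pvGen n
def pvRank : Nat → List Char → Nat
  | _, [] => 0
  | 0, _ :: _ => 0
  | n + 1, c :: t => 1 + (PySem.List.index? pvV c).getD 0 * pvG n + pvRank n t

theorem mem_pvProd (n : Nat) (cs : List Char) :
    cs ∈ pvProd n ↔ cs.length = n ∧ ∀ c ∈ cs, c ∈ pvV := by
  induction n generalizing cs with
  | zero =>
    simp only [pvProd, List.mem_singleton]
    constructor
    · rintro rfl; simp
    · rintro ⟨h, _⟩; exact List.length_eq_zero_iff.mp h
  | succ n ih =>
    simp only [pvProd, List.mem_flatMap, List.mem_map]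
    constructor
    · rintro ⟨c, hc, t, ht, rfl⟩
      obtain ⟨hlen, hall⟩ := (ih t).mp ht
      refine ⟨by simp [hlen], ?_⟩
      intro d hd
      rcases List.mem_cons.mp hd with rfl | hd
      · simpa [pvV] using hc
      · exact hall d hd
    · rintro ⟨hlen, hall⟩
      match cs with
      | c :: t =>
        exact ⟨c, by simpa [pvV] using hall c (by simp), t,
          (ih t).mpr ⟨by simpa using hlen, fun d hd => hall d (by simp [hd])⟩, rfl⟩

theorem disjoint_map_cons_of_ne (P : List (List Char)) {c d : Char} (h : c ≠ d) :
    (P.map (fun t => c :: t)).Disjoint (P.map (fun t => d :: t)) := by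
  rw [List.disjoint_left]
  rintro a ha hb
  obtain ⟨t, _, rfl⟩ := List.mem_map.mp ha
  obtain ⟨u, _, heq⟩ := List.mem_map.mp hb
  exact h (by injection heq with h1 _; exact h1.symm)

theorem nodup_pvProd (n : Nat) : (pvProd n).Nodup := by
  induction n with
  | zero => simp [pvProd]
  | succ n ih =>
    show (List.flatMap _ _).Nodup
    rw [List.nodup_flatMap]
    refine ⟨fun c _ => ih.map (fun a b h => by injection h), ?_⟩
    have hne : (['A', 'E', 'I', 'O', 'U'] : List Char).Pairwise (· ≠ ·) := by decide
    exact hne.imp (fun {c d} h => disjoint_map_cons_of_ne (pvProd n) h)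

theorem mem_pvGen (n : Nat) (cs : List Char) :
    cs ∈ pvGen n ↔ cs.length ≤ n ∧ ∀ c ∈ cs, c ∈ pvV := by
  induction n generalizing cs with
  | zero =>
    simp only [pvGen, List.mem_singleton]
    constructor
    · rintro rfl; simp
    · rintro ⟨h, _⟩; exact List.length_eq_zero_iff.mp (Nat.le_zero.mp h)
  | succ n ih =>
    simp only [pvGen, List.mem_cons, List.mem_flatMap, List.mem_map]
    constructor
    · rintro (rfl | ⟨c, hc, t, ht, rfl⟩)
      · simp
      · obtain ⟨hlen, hall⟩ := (ih t).mp ht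
        refine ⟨by simpa using hlen, ?_⟩
        intro d hd
        rcases List.mem_cons.mp hd with rfl | hd
        · exact hc
        · exact hall d hd
    · rintro ⟨hlen, hall⟩
      match cs with
      | [] => exact Or.inl rfl
      | c :: t =>
        exact Or.inr ⟨c, hall c (by simp), t,
          (ih t).mpr ⟨by simpa using hlen, fun d hd => hall d (by simp [hd])⟩, rfl⟩

theorem length_pvGen (n : Nat) : (pvGen n).length = pvG n := by
  induction n with
  | zero => rfl
  | succ n ih => simp [pvGen, pvV, ih, pvG]; ring

theorem pairwise_lt_pvGen (n : Nat) : (pvGen n).Pairwise (· < ·) := by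
  induction n with
  | zero => simp [pvGen]
  | succ n ih =>
    simp only [pvGen]
    refine List.Pairwise.cons ?_ ?_
    · intro b hb
      obtain ⟨c, _, t, _, rfl⟩ := by simpa [List.mem_flatMap, List.mem_map] using hb
      exact List.nil_lt_cons c t
    · rw [List.pairwise_flatMap]
      constructor
      · intro c _
        rw [List.pairwise_map]
        refine ih.imp ?_
        intro s t hst
        rw [List.cons_lt_cons_iff]; exact Or.inr ⟨rfl, hst⟩
      · have hlt : pvV.Pairwise (· < ·) := by decide
        refine hlt.imp ?_
        intro c d hcd x hx y hy
        obtain ⟨s, _, rfl⟩ := List.mem_map.mp hx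
        obtain ⟨t, _, rfl⟩ := List.mem_map.mp hy
        rw [List.cons_lt_cons_iff]; exact Or.inl hcd

theorem allData_eq :
    (List.range 5).foldl (fun acc i => acc ++ pvProd i) [] =
      pvProd 0 ++ pvProd 1 ++ pvProd 2 ++ pvProd 3 ++ pvProd 4 := by
  show List.foldl _ _ [0, 1, 2, 3, 4] = _
  simp only [List.foldl_cons, List.foldl_nil, List.nil_append]

theorem mem_allData (cs : List Char) :
    cs ∈ (List.range 5).foldl (fun acc i => acc ++ pvProd i) [] ↔
      cs.length ≤ 4 ∧ ∀ c ∈ cs, c ∈ pvV := by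
  rw [allData_eq]
  simp only [List.mem_append, mem_pvProd]
  constructor
  · rintro ((((⟨h, hv⟩ | ⟨h, hv⟩) | ⟨h, hv⟩) | ⟨h, hv⟩) | ⟨h, hv⟩) <;> exact ⟨by omega, hv⟩
  · rintro ⟨h, hv⟩
    interval_cases hlen : cs.length <;> simp_all

theorem nodup_allData :
    ((List.range 5).foldl (fun acc i => acc ++ pvProd i) []).Nodup := by
  rw [allData_eq]
  have hd : ∀ (xs : List (List Char)) (n : Nat),
      (∀ a ∈ xs, a.length < n) → xs.Nodup → (xs ++ pvProd n).Nodup := by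
    intro xs n hx hxs
    refine hxs.append (nodup_pvProd n) ?_
    rw [List.disjoint_left]
    intro a ha hb
    exact absurd ((mem_pvProd n a).mp hb).1 (by have := hx a ha; omega)
  have m01 : ∀ a ∈ pvProd 0 ++ pvProd 1, a.length < 2 := by
    intro a ha
    rcases List.mem_append.mp ha with h | h <;>
      · have := ((mem_pvProd _ a).mp h).1; omega
  have m2 : ∀ a ∈ pvProd 0 ++ pvProd 1 ++ pvProd 2, a.length < 3 := by
    intro a ha
    rcases List.mem_append.mp ha with h | h
    · have := m01 a h; omega
    · have := ((mem_pvProd _ a).mp h).1; omega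
  have m3 : ∀ a ∈ pvProd 0 ++ pvProd 1 ++ pvProd 2 ++ pvProd 3, a.length < 4 := by
    intro a ha
    rcases List.mem_append.mp ha with h | h
    · have := m2 a h; omega
    · have := ((mem_pvProd _ a).mp h).1; omega
  refine hd _ 4 m3 (hd _ 3 m2 (hd _ 2 m01 (hd _ 1 ?_ (nodup_pvProd 0))))
  intro a ha
  have := ((mem_pvProd _ a).mp ha).1; omega

theorem sorted_allData_eq :
    PySem.List.sorted ((List.range 5).foldl (fun acc i => acc ++ pvProd i) []) (fun t => t) false
      = pvGen 4 := by
  have hinst :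
      @PySem.List.sorted (List Char) (List Char) List.instLT (fun a b => a.decidableLT b)
          ((List.range 5).foldl (fun acc i => acc ++ pvProd i) []) (fun t => t) false
        = @PySem.List.sorted (List Char) (List Char) List.instLT
          ((inferInstance : LinearOrder (List Char)).toDecidableLT)
          ((List.range 5).foldl (fun acc i => acc ++ pvProd i) []) (fun t => t) false := by
    congr 1
  rw [hinst]
  exact PySem.List.sorted_eq_of_perm_of_pairwise_lt _ _ _
    (by rw [List.perm_ext_iff_of_nodup (List.Pairwise.imp (fun h => ne_of_lt h) (pairwise_lt_pvGen 4) : (pvGen 4).Nodup) nodup_allData]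
        intro a; rw [mem_pvGen, mem_allData])
    (pairwise_lt_pvGen 4)

theorem index?_append_of_not_mem {α : Type} [BEq α] [LawfulBEq α] (xs ys : List α) (v : α)
    (h : v ∉ xs) :
    PySem.List.index? (xs ++ ys) v = (PySem.List.index? ys v).map (· + xs.length) := by
  induction xs with
  | nil => simp
  | cons x xs ih =>
    rw [List.cons_append, PySem.List.index?_cons_of_ne _ (by rintro rfl; exact h List.mem_cons_self),
        ih (fun hm => h (List.mem_cons_of_mem x hm))]
    cases PySem.List.index? ys v <;> simp <;> omega

theorem index?_map_cons (c : Char) (s : List (List Char)) (v : List Char) :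
    PySem.List.index? (s.map (fun t => c :: t)) (c :: v) = PySem.List.index? s v := by
  induction s with
  | nil => simp
  | cons x s ih =>
    by_cases hx : x = v
    · subst hx
      rw [List.map_cons, PySem.List.index?_cons_self, PySem.List.index?_cons_self]
    · rw [List.map_cons, PySem.List.index?_cons_of_ne _ (by simp [hx]),
          PySem.List.index?_cons_of_ne _ hx, ih]

theorem index?_pvGen (n : Nat) (cs : List Char) (hl : cs.length ≤ n)
    (hv : ∀ c ∈ cs, c ∈ pvV) :
    PySem.List.index? (pvGen n) cs = some (pvRank n cs) := by
  induction n generalizing cs with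
  | zero =>
    match cs, hl with
    | [], _ => rfl
  | succ n ih =>
    match cs with
    | [] => rfl
    | c :: t =>
      have hc : c ∈ pvV := hv c (by simp)
      have ht : ∀ d ∈ t, d ∈ pvV := fun d hd => hv d (by simp [hd])
      have hlt : t.length ≤ n := by simpa using hl
      show PySem.List.index? ([] :: pvV.flatMap _) (c :: t) = _
      rw [PySem.List.index?_cons_of_ne _ (by simp)]
      have hblock : ∀ (k : Nat), (PySem.List.index? (pvGen n) t = some k) →
          PySem.List.index? (pvV.flatMap (fun d => (pvGen n).map (fun u => d :: u))) (c :: t)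
            = some ((PySem.List.index? pvV c).getD 0 * pvG n + k) := by
        intro k hk
        fin_cases hc <;>
        · show PySem.List.index? (List.flatMap _ (['A','E','I','O','U'] : List Char)) _ = _
          simp only [List.flatMap_cons, List.flatMap_nil, List.append_nil]
          repeat rw [index?_append_of_not_mem _ _ _ (by
            intro hm
            obtain ⟨u, _, he⟩ := List.mem_map.mp hm
            injection he with h1 _
            exact absurd h1 (by decide))]
          try rw [PySem.List.index?_append_of_mem _
            (List.mem_map.mpr ⟨t, (mem_pvGen n t).mpr ⟨hlt, ht⟩, rfl⟩)]
          rw [index?_map_cons, hk]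
          simp only [Option.map_some, List.length_map, length_pvGen, pvV,
            PySem.List.index?_eq_idxOf?, List.idxOf?, List.findIdx?, List.findIdx?.go,
            Option.getD]
          simp
          try omega
      rw [hblock (pvRank n t) (ih t hlt ht)]
      show _ = some (pvRank (n+1) (c :: t))
      simp [pvRank]
      omega

theorem alt_eq_rank (cs : List Char) (hl : cs.length ≤ 4) :
    (PySem.List.enumerate cs).foldl
      (fun idx p =>
        idx + (((PySem.List.index? (['A', 'E', 'I', 'O', 'U'] : List Char) p.2).getD 0 : Int)
                * (PySem.List.pyGet? ([156, 31, 6, 1] : List Int) p.1).getD 0) + 1)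
      1 = (pvRank 4 cs : Int) + 1 := by
  match cs, hl with
  | [], _ => rfl
  | [a], _ =>
    simp [PySem.List.enumerate, PySem.List.pyGet?, PySem.List.pyIdx?, pvRank, pvG, pvV]
  | [a, b], _ =>
    simp [PySem.List.enumerate, PySem.List.pyGet?, PySem.List.pyIdx?, pvRank, pvG, pvV]
    ring
  | [a, b, c], _ =>
    simp [PySem.List.enumerate, PySem.List.pyGet?, PySem.List.pyIdx?, pvRank, pvG, pvV]
    ring
  | [a, b, c, d], _ =>
    simp [PySem.List.enumerate, PySem.List.pyGet?, PySem.List.pyIdx?, pvRank, pvG, pvV]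
    ring
  | _ :: _ :: _ :: _ :: _ :: _, hl => exact absurd hl (by simp)

-- ===== VERDICT (by name: the statement is the Claim_ definition above) =====
theorem solution_spec : Claim_equal_solution := by
  intro word _ hpre
  obtain ⟨hl, hv'⟩ := hpre
  have hv : ∀ c ∈ word.toList, c ∈ (['A', 'E', 'I', 'O', 'U'] : List Char) := by
    simpa [List.all_eq_true] using hv'
  show solution word = solution_alt word
  unfold solution solution_alt
  simp only [sorted_allData_eq, index?_pvGen 4 word.toList hl (by simpa [pvV] using hv),
      alt_eq_rank word.toList hl]
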